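-- pv_equiv track=rewrite | github.com/Esteb37/ROS | src/line_follower/src/line_centroid.py | condense_consecutive_ones
-- ===== SOURCE A (Python) =====
-- def condense_consecutive_ones(arr):
--     found_one = False
--     for i in range(len(arr)):
--         if arr[i] == 1:
--             if found_one:
--                 arr[i] = 0
--             else:
--                 found_one = True
--         else:
--             found_one = False
--     return arr
-- ===== SOURCE B (Python) =====
-- def condense_consecutive_ones(arr):
--     # Backward neighbor test: zero each 1 whose original left neighbor is 1.
--     # Going from the end down to index 1, arr[i-1] is still its original value,
--     # so no flag is needed. Mutates arr in place, like A, and returns it.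
--     for i in range(len(arr) - 1, 0, -1):
--         if arr[i] == 1 and arr[i - 1] == 1:
--             arr[i] = 0
--     return arr
-- ===== Notes on version B (the rewrite author's own statement) =====
-- stated objective: simpler
-- what changed: Replaced the forward scan with a carried found_one flag by a stateless neighbor test: walking backward, each 1 whose original left neighbor is 1 is zeroed, so no flag is maintained.
import Mathlib
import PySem

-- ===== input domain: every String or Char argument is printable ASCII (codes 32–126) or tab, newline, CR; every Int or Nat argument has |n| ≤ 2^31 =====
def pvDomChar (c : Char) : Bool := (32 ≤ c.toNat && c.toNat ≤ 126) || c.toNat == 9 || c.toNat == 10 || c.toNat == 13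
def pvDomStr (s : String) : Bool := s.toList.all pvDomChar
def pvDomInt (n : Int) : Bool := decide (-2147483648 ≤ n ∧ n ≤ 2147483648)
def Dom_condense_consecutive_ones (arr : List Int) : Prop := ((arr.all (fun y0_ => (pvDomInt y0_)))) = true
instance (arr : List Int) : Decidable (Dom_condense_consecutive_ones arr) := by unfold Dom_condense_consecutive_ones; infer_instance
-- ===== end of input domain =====

-- B replaces A's forward scan with a found_one flag by a stateless test of each
-- element's original left neighbor (objective: simpler). Both Pythons mutate arr
-- in place and return it; the equivalence proved here is about the return value.

-- ===== PORT A =====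
-- A's index loop touches only position i at step i and carries the flag found_one,
-- so it is the structural recursion over the list with the same flag.
def condense_go (found : Bool) : List Int → List Int
  | [] => []
  | x :: xs =>
      if x = 1 then
        (if found then 0 else x) :: condense_go true xs
      else
        x :: condense_go false xs

def condense_consecutive_ones (arr : List Int) : List Int :=
  condense_go false arr

-- ===== PORT B =====
-- B zeroes each 1 whose ORIGINAL left neighbor is 1 (its backward order in Python
-- exists only so the in-place reads see original values); the pure port applies
-- that per-index neighbor test directly, the head element untouched.
def condense_consecutive_ones_alt (arr : List Int) : List Int :=
  match arr with
  | [] => []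
  | x :: xs =>
      x :: List.zipWith (fun prev cur => if cur = 1 ∧ prev = 1 then 0 else cur) (x :: xs) xs

-- ===== PRECONDITION & SPEC =====
def Spec_condense_consecutive_ones (arr : List Int) (out : List Int) : Prop := out = condense_consecutive_ones_alt arr
instance (arr : List Int) (out : List Int) : Decidable (Spec_condense_consecutive_ones arr out) := by unfold Spec_condense_consecutive_ones; infer_instance

-- ===== CLAIM (what is proved, stated in full; the proofs are below) =====
def Claim_equal_condense_consecutive_ones : Prop := ∀ (arr : List Int), Dom_condense_consecutive_ones arr → Spec_condense_consecutive_ones arr (condense_consecutive_ones arr)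

-- ===== LEMMAS AND PROOFS =====

-- A's flag equals "the original previous element was 1".
theorem condense_go_eq_zipWith (xs : List Int) (prev : Int) :
    condense_go (decide (prev = 1)) xs
      = List.zipWith (fun prev cur => if cur = 1 ∧ prev = 1 then 0 else cur) (prev :: xs) xs := by
  induction xs generalizing prev with
  | nil => simp [condense_go]
  | cons x rest ih =>
      by_cases hx : x = 1
      · subst hx
        have h := ih (prev := 1)
        by_cases hp : prev = 1 <;>
          simp [condense_go, hp, List.zipWith] at h ⊢ <;> simpa using h
      · have h := ih (prev := x)
        simp [condense_go, hx, List.zipWith] at h ⊢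
        simpa [hx] using h

-- ===== VERDICT (by name: the statement is the Claim_ definition above) =====
theorem condense_consecutive_ones_spec : Claim_equal_condense_consecutive_ones := by
  intro arr _
  unfold Spec_condense_consecutive_ones condense_consecutive_ones condense_consecutive_ones_alt
  cases arr with
  | nil => simp [condense_go]
  | cons x xs =>
      by_cases hx : x = 1
      · subst hx
        have h := condense_go_eq_zipWith xs (prev := 1)
        simp [condense_go] at h ⊢
        simpa using h
      · have h := condense_go_eq_zipWith xs (prev := x)
        simp [condense_go, hx] at h ⊢
        simpa [hx] using h
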